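-- pv_equiv track=rewrite | github.com/bad-ants-fleet/drtransformer | drtransformer/utils.py | make_loop_index
-- ===== SOURCE A (Python) =====
-- def make_loop_index(ss):
--     """Returns a list of loop indices to see where new base-pairs can be formed.
--     """
--     loop, stack = [], []
--     nl, L = 0, 0
--     for i, char in enumerate(ss):
--         if char == '(':
--             nl += 1
--             L = nl
--             stack.append(i)
--         loop.append(L)
--         if char == ')':
--             _ = stack.pop()
--             try:
--                 L = loop[stack[-1]]
--             except IndexError:
--                 L = 0
--     return loop
-- ===== SOURCE B (Python) =====
-- def make_loop_index(ss):
--     """Returns a list of loop indices to see where new base-pairs can be formed.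
--
--     Two staged passes: first compute every position's nesting depth and the
--     fresh pair id opened at every '('; then label each position with the id of
--     the latest pair opened at its depth (a depth-indexed map, no stack).
--     """
--     n = len(ss)
--     depth = []
--     ids = []
--     d = 0
--     nl = 0
--     for c in ss:
--         if c == '(':
--             d += 1
--             nl += 1
--             ids.append(nl)
--         else:
--             ids.append(0)
--         depth.append(d)
--         if c == ')':
--             d -= 1
--     last = {}
--     loop = []
--     for i in range(n):
--         if ids[i]:
--             last[depth[i]] = ids[i]
--         loop.append(last.get(depth[i], 0))
--     return loop
-- ===== Notes on version B (the rewrite author's own statement) =====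
-- stated objective: alternative
-- what changed: Replaces the single-pass stack machine (position stack, pop, loop[stack[-1]]/try-except reconstruction) by two staged passes: pass 1 computes every position's nesting depth and fresh pair ids, pass 2 labels each position from a depth-indexed map of the latest pair opened at that depth - no stack, no pop, no exception handling.
import Mathlib
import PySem

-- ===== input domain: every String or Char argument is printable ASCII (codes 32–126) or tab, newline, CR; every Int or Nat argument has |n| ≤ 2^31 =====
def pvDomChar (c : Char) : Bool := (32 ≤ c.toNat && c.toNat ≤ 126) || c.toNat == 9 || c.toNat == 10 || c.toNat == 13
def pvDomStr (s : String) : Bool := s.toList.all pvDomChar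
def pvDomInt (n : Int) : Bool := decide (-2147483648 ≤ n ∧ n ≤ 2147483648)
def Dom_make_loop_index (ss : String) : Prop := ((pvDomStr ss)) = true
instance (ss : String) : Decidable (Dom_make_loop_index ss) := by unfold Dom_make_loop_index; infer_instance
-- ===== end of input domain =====

-- B replaces A's single-pass stack machine (position stack, pop, loop[stack[-1]]/try-except) by two
-- staged passes: nesting depths + fresh pair ids first, then labels via a depth-indexed map (no stack).
-- A raises IndexError on an unmatched ')' (pop from the empty stack); Pre_ excludes exactly those inputs.

-- ===== PORT A =====
-- for i, char in enumerate(ss): transliterated as structural recursion carrying the index i;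
-- stack top at the head of the list; 'none' marks the uncaught IndexError of stack.pop() on [].
def makeLoopIndexGoA : List Char → Nat → List Int → List Int → Int → Int → Option (List Int)
  | [], _, loop, _, _, _ => some loop
  | ch :: rest, i, loop, stack, nl, L =>
    let nl' := if ch = '(' then nl + 1 else nl
    let L' := if ch = '(' then nl' else L
    let stack' := if ch = '(' then (i : Int) :: stack else stack
    let loop' := loop ++ [L']
    if ch = ')' then
      match stack' with
      | [] => none          -- stack.pop() raises IndexError (outside the try)
      | _ :: rest' =>
        -- try: L = loop[stack[-1]]  except IndexError: L = 0
        let L'' := match rest' with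
          | [] => (0 : Int)
          | q :: _ => (PySem.List.pyGet? loop' q).getD 0
        makeLoopIndexGoA rest (i + 1) loop' rest' nl' L''
    else
      makeLoopIndexGoA rest (i + 1) loop' stack' nl' L'

def make_loop_index (ss : String) : List Int :=
  (makeLoopIndexGoA ss.toList 0 [] [] 0 0).getD []

-- ===== PORT B =====
-- Source B pass 1: build the depth and ids arrays (list appends), carrying d and nl.
def altPass1 : List Char → List Int → List Int → Int → Int → List Int × List Int × Int × Int
  | [], depth, ids, d, nl => (depth, ids, d, nl)
  | c :: rest, depth, ids, d, nl =>
    let d1 := if c = '(' then d + 1 else d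
    let nl1 := if c = '(' then nl + 1 else nl
    let ids1 := ids ++ [if c = '(' then nl1 else 0]
    let depth1 := depth ++ [d1]
    let d2 := if c = ')' then d1 - 1 else d1
    altPass1 rest depth1 ids1 d2 nl1

-- Source B pass 2: for i in range(n): maybe update the depth-indexed map, then label position i.
-- depth[i]/ids[i] are read with pyGet?…getD 0: exact, since 0 ≤ i < n = len(depth) = len(ids).
def altPass2 (depth ids : List Int) : List Nat → PySem.Dict Int Int → List Int → List Int
  | [], _, loop => loop
  | i :: rest, last, loop =>
    let di := (PySem.List.pyGet? depth (i : Int)).getD 0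
    let idi := (PySem.List.pyGet? ids (i : Int)).getD 0
    let last1 := if idi ≠ 0 then last.insert di idi else last
    altPass2 depth ids rest last1 (loop ++ [last1.getD di 0])

def make_loop_index_alt (ss : String) : List Int :=
  let p := altPass1 ss.toList [] [] 0 0
  altPass2 p.1 p.2.1 (List.range ss.toList.length) PySem.Dict.empty []

-- ===== PRECONDITION & SPEC =====
-- Pre_: every prefix has at least as many '(' as ')' (otherwise A raises IndexError on stack.pop()).
def Pre_make_loop_index (ss : String) : Prop :=
  ∀ n ∈ List.range (ss.toList.length + 1),
    (ss.toList.take n).count ')' ≤ (ss.toList.take n).count '('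
instance (ss : String) : Decidable (Pre_make_loop_index ss) := by unfold Pre_make_loop_index; infer_instance

def pvWitness_make_loop_index : String := "((.)x)()"

def Spec_make_loop_index (ss : String) (out : List Int) : Prop := out = make_loop_index_alt ss
instance (ss : String) (out : List Int) : Decidable (Spec_make_loop_index ss out) := by unfold Spec_make_loop_index; infer_instance

-- ===== CLAIM (what is proved, stated in full; the proofs are below) =====
def Claim_equal_make_loop_index : Prop := ∀ (ss : String), Dom_make_loop_index ss → Pre_make_loop_index ss → Spec_make_loop_index ss (make_loop_index ss)

-- ===== LEMMAS AND PROOFS =====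

-- Proof-side bridge machine: A's stack machine with loop ids on the stack instead of positions.
def goB : List Char → List Int → List Int → Int → Option (List Int)
  | [], loop, _, _ => some loop
  | ch :: rest, loop, stack, nl =>
    let nl' := if ch = '(' then nl + 1 else nl
    let stack' := if ch = '(' then nl' :: stack else stack
    let loop' := loop ++ [stack'.headD 0]
    if ch = ')' then
      match stack' with
      | [] => none
      | _ :: rest' => goB rest loop' rest' nl'
    else
      goB rest loop' stack' nl'

-- pyGet? at a stored nonnegative index is unchanged when the list grows at the end
lemma pyGet?_append_of_some {loop : List Int} {p : Int} {v x : Int}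
    (hp : 0 ≤ p) (h : PySem.List.pyGet? loop p = some v) :
    PySem.List.pyGet? (loop ++ [x]) p = some v := by
  rw [PySem.List.pyGet?_of_nonneg loop hp] at h
  rw [PySem.List.pyGet?_of_nonneg (loop ++ [x]) hp]
  have hlt : p.toNat < loop.length := (List.getElem?_eq_some_iff.mp h).1
  rw [List.getElem?_append_left hlt]
  exact h

-- invariant relating A's state to goB's state
def StackRel (loop : List Int) (stackA stackB : List Int) : Prop :=
  List.Forall₂ (fun p id => 0 ≤ p ∧ PySem.List.pyGet? loop p = some id) stackA stackB

lemma stackRel_grow {loop stackA stackB : List Int} {x : Int}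
    (h : StackRel loop stackA stackB) : StackRel (loop ++ [x]) stackA stackB := by
  induction h with
  | nil => exact List.Forall₂.nil
  | cons hpq _ ih =>
      exact List.Forall₂.cons ⟨hpq.1, pyGet?_append_of_some hpq.1 hpq.2⟩ ih

lemma goA_eq_goB (cs : List Char) (loop stackA stackB : List Int) (nl L : Int)
    (hrel : StackRel loop stackA stackB)
    (hL : L = stackB.headD 0) :
    makeLoopIndexGoA cs loop.length loop stackA nl L = goB cs loop stackB nl := by
  induction cs generalizing loop stackA stackB nl L with
  | nil => rfl
  | cons ch rest ih =>
    subst hL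
    simp only [makeLoopIndexGoA, goB]
    by_cases hop : ch = '('
    · simp only [hop, if_neg (by decide : '(' ≠ ')')]
      have hrel' : StackRel (loop ++ [nl + 1]) ((loop.length : Int) :: stackA) ((nl + 1) :: stackB) :=
        List.Forall₂.cons ⟨Int.natCast_nonneg _,
          PySem.List.pyGet?_append_length loop [] (nl + 1)⟩
          (stackRel_grow hrel)
      have := ih (loop ++ [nl + 1]) ((loop.length : Int) :: stackA) ((nl + 1) :: stackB)
        (nl + 1) (nl + 1) hrel' (by simp)
      simpa using this
    · simp only [if_neg hop]
      by_cases hcl : ch = ')'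
      · simp only [hcl]
        cases hrel with
        | nil => simp
        | @cons p id restA restB hpq hrest =>
          have hrest' : StackRel (loop ++ [id]) restA restB := stackRel_grow hrest
          cases hrest' with
          | nil =>
            have := ih (loop ++ [id]) [] [] nl 0 List.Forall₂.nil (by simp)
            simpa using this
          | @cons q id2 restA2 restB2 hq hrest2 =>
            have := ih (loop ++ [id]) (q :: restA2) (id2 :: restB2) nl
              ((PySem.List.pyGet? (loop ++ [id]) q).getD 0)
              (List.Forall₂.cons hq hrest2)
              (by rw [hq.2]; rfl)
            simpa using this
      · simp only [if_neg hcl]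
        have := ih (loop ++ [stackB.headD 0]) stackA stackB nl (stackB.headD 0)
          (stackRel_grow hrel) rfl
        simpa using this

-- goB with its full final state exposed (needed to append one character at a time)
def goBS : List Char → List Int → List Int → Int → Option (List Int × List Int × Int)
  | [], loop, stack, nl => some (loop, stack, nl)
  | ch :: rest, loop, stack, nl =>
    let nl' := if ch = '(' then nl + 1 else nl
    let stack' := if ch = '(' then nl' :: stack else stack
    let loop' := loop ++ [stack'.headD 0]
    if ch = ')' then
      match stack' with
      | [] => none
      | _ :: rest' => goBS rest loop' rest' nl'
    else
      goBS rest loop' stack' nl'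

lemma goB_eq_goBS : ∀ (cs : List Char) (loop s : List Int) (nl : Int),
    goB cs loop s nl = (goBS cs loop s nl).map (·.1) := by
  intro cs
  induction cs with
  | nil => intro loop s nl; rfl
  | cons ch rest ih =>
    intro loop s nl
    simp only [goB, goBS]
    by_cases hop : ch = '('
    · simp [hop, ih]
    · by_cases hcl : ch = ')'
      · simp only [hop, hcl, Char.reduceEq, reduceIte]
        cases s <;> simp [ih]
      · simp [hop, hcl, ih]

lemma goBS_snoc : ∀ (cs : List Char) (c : Char) (loop s : List Int) (nl : Int),
    goBS (cs ++ [c]) loop s nl =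
      (goBS cs loop s nl).bind (fun st => goBS [c] st.1 st.2.1 st.2.2) := by
  intro cs
  induction cs with
  | nil => intro c loop s nl; rfl
  | cons ch rest ih =>
    intro c loop s nl
    rw [List.cons_append]
    by_cases hop : ch = '('
    · subst hop
      have h : ∀ (cs' : List Char), goBS ('(' :: cs') loop s nl =
          goBS cs' (loop ++ [nl + 1]) ((nl + 1) :: s) (nl + 1) := by
        intro cs'; simp [goBS]
      rw [h, h, ih]
    · by_cases hcl : ch = ')'
      · subst hcl
        cases s with
        | nil =>
          have h : ∀ (cs' : List Char), goBS (')' :: cs') loop [] nl = none := by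
            intro cs'; simp [goBS]
          rw [h, h]; rfl
        | cons a t =>
          have h : ∀ (cs' : List Char), goBS (')' :: cs') loop (a :: t) nl =
              goBS cs' (loop ++ [a]) t nl := by
            intro cs'; simp [goBS]
          rw [h, h, ih]
      · have h : ∀ (cs' : List Char), goBS (ch :: cs') loop s nl =
            goBS cs' (loop ++ [s.headD 0]) s nl := by
          intro cs'; simp [goBS, hop, hcl]
        rw [h, h, ih]

-- pass 1: appending one character is one more step on the accumulated state
lemma pass1_snoc : ∀ (cs : List Char) (c : Char) (depth ids : List Int) (d nl : Int),
    altPass1 (cs ++ [c]) depth ids d nl =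
      altPass1 [c] (altPass1 cs depth ids d nl).1 (altPass1 cs depth ids d nl).2.1
        (altPass1 cs depth ids d nl).2.2.1 (altPass1 cs depth ids d nl).2.2.2 := by
  intro cs
  induction cs with
  | nil => intro c depth ids d nl; rfl
  | cons ch rest ih =>
    intro c depth ids d nl
    simp only [List.cons_append, altPass1]
    exact ih c _ _ _ _

-- pass 1 bookkeeping: array lengths, final depth, final counter
lemma pass1_parts : ∀ (cs : List Char) (depth ids : List Int) (d nl : Int),
    (altPass1 cs depth ids d nl).1.length = depth.length + cs.length ∧
    (altPass1 cs depth ids d nl).2.1.length = ids.length + cs.length ∧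
    (altPass1 cs depth ids d nl).2.2.1 = d + (cs.count '(' : Int) - (cs.count ')' : Int) ∧
    (altPass1 cs depth ids d nl).2.2.2 = nl + (cs.count '(' : Int) := by
  intro cs
  induction cs with
  | nil => intro depth ids d nl; simp [altPass1]
  | cons ch rest ih =>
    intro depth ids d nl
    simp only [altPass1]
    obtain ⟨h1, h2, h3, h4⟩ := ih (depth ++ [if ch = '(' then d + 1 else d])
      (ids ++ [if ch = '(' then (if ch = '(' then nl + 1 else nl) else 0])
      (if ch = ')' then (if ch = '(' then d + 1 else d) - 1 else (if ch = '(' then d + 1 else d))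
      (if ch = '(' then nl + 1 else nl)
    refine ⟨by simp [h1]; omega, by simp [h2]; omega, ?_, ?_⟩
    · rw [h3]
      by_cases hop : ch = '(' <;> by_cases hcl : ch = ')' <;>
        simp_all [List.count_cons] <;> push_cast <;> omega
    · rw [h4]
      by_cases hop : ch = '(' <;>
        simp_all [List.count_cons] <;> push_cast <;> omega

-- pass 2 with its final dict exposed
def altPass2S (depth ids : List Int) : List Nat → PySem.Dict Int Int → List Int →
    List Int × PySem.Dict Int Int
  | [], last, loop => (loop, last)
  | i :: rest, last, loop =>
    let di := (PySem.List.pyGet? depth (i : Int)).getD 0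
    let idi := (PySem.List.pyGet? ids (i : Int)).getD 0
    let last1 := if idi ≠ 0 then last.insert di idi else last
    altPass2S depth ids rest last1 (loop ++ [last1.getD di 0])

lemma pass2_eq_pass2S : ∀ (idxs : List Nat) (depth ids : List Int)
    (last : PySem.Dict Int Int) (loop : List Int),
    altPass2 depth ids idxs last loop = (altPass2S depth ids idxs last loop).1 := by
  intro idxs
  induction idxs with
  | nil => intro depth ids last loop; rfl
  | cons i rest ih => intro depth ids last loop; simp only [altPass2, altPass2S]; exact ih _ _ _ _

lemma pass2S_append : ∀ (xs ys : List Nat) (depth ids : List Int)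
    (last : PySem.Dict Int Int) (loop : List Int),
    altPass2S depth ids (xs ++ ys) last loop =
      altPass2S depth ids ys (altPass2S depth ids xs last loop).2
        (altPass2S depth ids xs last loop).1 := by
  intro xs
  induction xs with
  | nil => intro ys depth ids last loop; rfl
  | cons i rest ih =>
    intro ys depth ids last loop
    simp only [List.cons_append, altPass2S]
    exact ih _ _ _ _ _

-- pass 2 only reads array cells below the indices it visits
lemma pass2S_congr : ∀ (idxs : List Nat) (depth ids e1 e2 : List Int)
    (last : PySem.Dict Int Int) (loop : List Int),
    (∀ k ∈ idxs, k < depth.length ∧ k < ids.length) →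
    altPass2S (depth ++ e1) (ids ++ e2) idxs last loop = altPass2S depth ids idxs last loop := by
  intro idxs
  induction idxs with
  | nil => intro depth ids e1 e2 last loop _; rfl
  | cons i rest ih =>
    intro depth ids e1 e2 last loop h
    obtain ⟨hd, hi⟩ := h i (by simp)
    simp only [altPass2S, PySem.List.pyGet?_natCast,
      List.getElem?_append_left hd, List.getElem?_append_left hi]
    exact ih _ _ _ _ _ _ (fun k hk => h k (by simp [hk]))

-- THE BRIDGE: on prefix-balanced input, the id-stack machine and B's two passes produce the same
-- labels, with the machine's stack entries stored in the dict under their depths.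
theorem bridge : ∀ (cs : List Char),
    (∀ n, ((cs.take n).count ')') ≤ ((cs.take n).count '(')) →
    ∃ out s nl last,
      goBS cs [] [] 0 = some (out, s, nl) ∧
      altPass2S (altPass1 cs [] [] 0 0).1 (altPass1 cs [] [] 0 0).2.1
        (List.range cs.length) PySem.Dict.empty [] = (out, last) ∧
      (s.length : Int) = (cs.count '(' : Int) - (cs.count ')' : Int) ∧
      nl = (cs.count '(' : Int) ∧
      (∀ j : Nat, j < s.length → last.get? ((s.length : Int) - (j : Int)) = s[j]?) ∧
      (∀ j : Int, j ≤ 0 → last.get? j = none) := by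
  intro cs
  induction cs using List.reverseRecOn with
  | nil =>
    intro _
    exact ⟨[], [], 0, PySem.Dict.empty, rfl, rfl, by simp, by simp,
      by intro j hj; simp at hj, by intro j hj; simp [PySem.Dict.get?_empty]⟩
  | append_singleton xs c ih =>
    intro hbal
    have hbalxs : ∀ n, ((xs.take n).count ')') ≤ ((xs.take n).count '(') := by
      intro n
      by_cases h : n ≤ xs.length
      · have := hbal n
        rwa [List.take_append_of_le_length h] at this
      · have := hbal xs.length
        rw [List.take_append_of_le_length le_rfl, List.take_length] at this
        rwa [List.take_of_length_le (by omega)]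
    obtain ⟨out, s, nl, last, hgo, hp2, hlen, hnl, hinv, hneg⟩ := ih hbalxs
    obtain ⟨hd1, hi1, hd2, hn2⟩ := pass1_parts xs [] [] 0 0
    simp only [List.length_nil, Nat.zero_add, Int.zero_add] at hd1 hi1 hd2 hn2
    set D := (altPass1 xs [] [] 0 0).1 with hD
    set I := (altPass1 xs [] [] 0 0).2.1 with hI
    set dep := (altPass1 xs [] [] 0 0).2.2.1 with hdep
    set cnt := (altPass1 xs [] [] 0 0).2.2.2 with hcnt
    have h1s := pass1_snoc xs c [] [] 0 0
    rw [← hD, ← hI, ← hdep, ← hcnt] at h1s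
    have hstep : altPass1 [c] D I dep cnt =
        (D ++ [if c = '(' then dep + 1 else dep],
         I ++ [if c = '(' then (if c = '(' then cnt + 1 else cnt) else 0],
         (if c = ')' then (if c = '(' then dep + 1 else dep) - 1 else (if c = '(' then dep + 1 else dep)),
         (if c = '(' then cnt + 1 else cnt)) := rfl
    have hlen1 : (xs ++ [c]).length = xs.length + 1 := by simp
    have hfirst : ∀ (e1 e2 : List Int),
        altPass2S (D ++ e1) (I ++ e2) (List.range xs.length) PySem.Dict.empty [] = (out, last) := by
      intro e1 e2
      rw [pass2S_congr _ D I e1 e2 _ _ (by intro k hk; simp only [List.mem_range] at hk; omega)]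
      exact hp2
    have hgetD : ∀ z : Int, PySem.List.pyGet? (D ++ [z]) ((xs.length : Nat) : Int) = some z := by
      intro z
      rw [PySem.List.pyGet?_natCast, ← hd1]
      exact List.getElem?_concat_length
    have hgetI : ∀ z : Int, PySem.List.pyGet? (I ++ [z]) ((xs.length : Nat) : Int) = some z := by
      intro z
      rw [PySem.List.pyGet?_natCast, ← hi1]
      exact List.getElem?_concat_length
    have hdep0 : (0 : Int) ≤ dep := by
      have := hbalxs xs.length
      rw [List.take_of_length_le le_rfl] at this
      omega
    have hslen : (s.length : Int) = dep := by rw [hlen, hd2]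
    have hnc : nl = cnt := by rw [hnl, hn2]
    by_cases hop : c = '('
    · -- '(' : push id cnt+1; B inserts it at depth dep+1 and reads it back
      have hcap : ((xs ++ [c]).count '(' : Int) = (xs.count '(' : Int) + 1 := by
        simp [hop, List.count_append]
      have hccp : ((xs ++ [c]).count ')' : Int) = (xs.count ')' : Int) := by
        simp [hop, List.count_append]
      refine ⟨out ++ [cnt + 1], (cnt + 1) :: s, cnt + 1,
        last.insert (dep + 1) (cnt + 1), ?_, ?_, ?_, ?_, ?_, ?_⟩
      · rw [goBS_snoc, hgo]
        simp [goBS, hop, hnc]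
      · rw [h1s, hstep, hlen1, List.range_succ, pass2S_append, hfirst]
        have hcz : cnt + 1 ≠ 0 := by rw [hn2]; positivity
        simp only [hop, if_pos rfl, altPass2S, hgetD, hgetI, Option.getD_some, ne_eq, hcz,
          not_false_eq_true, if_pos, PySem.Dict.getD_insert_self]
      · rw [hcap, hccp]
        simp only [List.length_cons]
        push_cast
        omega
      · rw [hcap, hn2]
      · intro j hj
        cases j with
        | zero =>
          have hk : ((((cnt + 1) :: s).length : Int) - (((0 : Nat)) : Int)) = dep + 1 := by
            simp only [List.length_cons]
            push_cast
            omega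
          rw [hk, PySem.Dict.get?_insert_self]
          simp
        | succ j' =>
          have hk : ((((cnt + 1) :: s).length : Int) - (((j' + 1 : Nat)) : Int)) =
              ((s.length : Int) - ((j' : Nat) : Int)) := by
            simp only [List.length_cons]
            push_cast
            omega
          have hne : ((s.length : Int) - ((j' : Nat) : Int)) ≠ dep + 1 := by
            have := hslen
            omega
          rw [hk, PySem.Dict.get?_insert_of_ne _ _ hne]
          have := hinv j' (by simp only [List.length_cons] at hj; omega)
          simpa using this
      · intro j hj
        have hne : j ≠ dep + 1 := by omega
        rw [PySem.Dict.get?_insert_of_ne _ _ hne]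
        exact hneg j hj
    · by_cases hcl : c = ')'
      · -- ')' : the stack is nonempty (prefix balance); pop; B reads the dict at depth dep
        have hcap : ((xs ++ [c]).count '(' : Int) = (xs.count '(' : Int) := by
          simp [hcl, hop, List.count_append]
        have hccp : ((xs ++ [c]).count ')' : Int) = (xs.count ')' : Int) + 1 := by
          simp [hcl, List.count_append]
        have hge1 : (1 : Int) ≤ dep := by
          have hfull := hbal (xs.length + 1)
          rw [List.take_of_length_le (by simp)] at hfull
          have : ((xs ++ [c]).count ')' : Int) ≤ ((xs ++ [c]).count '(' : Int) := by
            exact_mod_cast hfull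
          rw [hcap, hccp] at this
          omega
        have hsne : s ≠ [] := by
          intro h
          rw [h] at hslen
          simp at hslen
          omega
        obtain ⟨a, t, rfl⟩ := List.exists_cons_of_ne_nil hsne
        have hread : last.getD dep 0 = a := by
          have h0 := hinv 0 (by simp)
          have hk : (((a :: t).length : Int) - (((0 : Nat)) : Int)) = dep := by
            rw [← hslen]
            simp
          rw [hk] at h0
          simp only [List.getElem?_cons_zero] at h0
          exact PySem.Dict.getD_of_get?_eq_some _ 0 h0
        refine ⟨out ++ [a], t, nl, last, ?_, ?_, ?_, ?_, ?_, hneg⟩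
        · rw [goBS_snoc, hgo]
          simp [goBS, hcl]
        · rw [h1s, hstep, hlen1, List.range_succ, pass2S_append, hfirst]
          simp only [hcl, hop, Char.reduceEq, reduceIte, altPass2S, hgetD, hgetI,
            Option.getD_some, ne_eq, not_true_eq_false, if_neg, if_false, hread]
        · rw [hcap, hccp]
          have hlc : ((a :: t).length : Int) = dep := hslen
          simp only [List.length_cons] at hlc
          push_cast at hlc ⊢
          omega
        · rw [hcap, hnl]
        · intro j hj
          have := hinv (j + 1) (by simp only [List.length_cons]; omega)
          have hk : (((a :: t).length : Int) - (((j + 1 : Nat)) : Int)) =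
              ((t.length : Int) - ((j : Nat) : Int)) := by
            simp only [List.length_cons]
            push_cast
            omega
          rw [hk] at this
          simpa using this
      · -- ordinary character: stack and dict unchanged; B reads the dict at depth dep
        have hcap : ((xs ++ [c]).count '(' : Int) = (xs.count '(' : Int) := by
          simp [List.count_append, List.count_singleton, hop]
        have hccp : ((xs ++ [c]).count ')' : Int) = (xs.count ')' : Int) := by
          simp [List.count_append, List.count_singleton, hcl]
        have hread : last.getD dep 0 = s.headD 0 := by
          cases s with
          | nil =>
            have hz : dep = 0 := by
              rw [← hslen]
              simp
            rw [hz]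
            simp [PySem.Dict.getD_eq_get?_getD, hneg 0 le_rfl]
          | cons a t =>
            have h0 := hinv 0 (by simp)
            have hk : (((a :: t).length : Int) - (((0 : Nat)) : Int)) = dep := by
              rw [← hslen]
              simp
            rw [hk] at h0
            simp only [List.getElem?_cons_zero] at h0
            simp [PySem.Dict.getD_of_get?_eq_some _ 0 h0]
        refine ⟨out ++ [s.headD 0], s, nl, last, ?_, ?_, ?_, ?_, hinv, hneg⟩
        · rw [goBS_snoc, hgo]
          simp [goBS, hop, hcl]
        · rw [h1s, hstep, hlen1, List.range_succ, pass2S_append, hfirst]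
          simp only [if_neg hop, if_neg hcl, altPass2S, hgetD, hgetI, Option.getD_some,
            ne_eq, not_true_eq_false, if_false, hread]
        · rw [hcap, hccp, hslen, hd2]
        · rw [hcap, hnl]

-- ===== VERDICT (by name: the statement is the Claim_ definition above) =====
theorem make_loop_index_spec : Claim_equal_make_loop_index := by
  intro ss _ hpre
  unfold Spec_make_loop_index make_loop_index make_loop_index_alt
  have hbal : ∀ n, ((ss.toList.take n).count ')') ≤ ((ss.toList.take n).count '(') := by
    intro n
    by_cases h : n ≤ ss.toList.length
    · exact hpre n (by simp only [List.mem_range]; omega)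
    · rw [List.take_of_length_le (by omega)]
      have := hpre ss.toList.length (by simp)
      rwa [List.take_of_length_le le_rfl] at this
  obtain ⟨out, s, nl, last, hgo, hp2, -, -, -, -⟩ := bridge ss.toList hbal
  rw [show (0 : Nat) = ([] : List Int).length from rfl,
      goA_eq_goB ss.toList [] [] [] 0 0 List.Forall₂.nil rfl]
  rw [goB_eq_goBS, hgo]
  rw [pass2_eq_pass2S, hp2]
  rfl
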